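-- pv_equiv track=rewrite | github.com/diwert-ai/Problems | Problems/Checkio/Moderate/can pass.py | can_pass
-- ===== SOURCE A (Python) =====
-- from collections import deque
--
-- def bfs_p(start_vertex, g, parents):
--     queue = deque([start_vertex])
--     parents[start_vertex] = None
--     while queue:
--         cur_v = queue.popleft()
--         for neighbor in g[cur_v]:
--             if neighbor not in parents:
--                 parents[neighbor] = cur_v
--                 queue.append(neighbor)
--
-- def find_path(start_vertex, end_vertex, g):
--     if start_vertex not in g:
--         return None
--     parents = dict()
--     bfs_p(start_vertex, g, parents)
--     if end_vertex not in parents: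
--         return None
--     parent = parents[end_vertex]
--     path = [end_vertex]
--     while parent is not None:
--         path.append(parent)
--         parent = parents[parent]
--     return path[::-1]
--
-- def can_pass(matrix, first, second):
--     value = matrix[first[0]][first[1]]
--     if value != matrix[second[0]][second[1]]:
--         return False
--     n = len(matrix)
--     m = len(matrix[0])
--     g = dict()
--     for i in range(n):
--         for j in range(m):
--             if matrix[i][j] == value:
--                 s = set()
--                 ij = ((i, j + 1), (i, j - 1), (i + 1, j), (i - 1, j))
--                 for p, k in ij:
--                     if -1 < p < n and -1 < k < m and matrix[p][k] == value:
--                         s.add((p, k))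
--                 g[(i, j)] = s
--     return find_path(first, second, g) is not None
-- ===== SOURCE B (Python) =====
-- def can_pass(matrix, first, second):
--     value = matrix[first[0]][first[1]]
--     if value != matrix[second[0]][second[1]]:
--         return False
--     n, m = len(matrix), len(matrix[0])
--
--     def good(c):
--         i, j = c
--         return 0 <= i < n and 0 <= j < m and matrix[i][j] == value
--
--     if not good(first):
--         return False
--     visited = {first}
--     stack = [first]
--     while stack:
--         i, j = stack.pop()
--         for nb in ((i, j + 1), (i, j - 1), (i + 1, j), (i - 1, j)):
--             if good(nb) and nb not in visited:
--                 visited.add(nb)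
--                 stack.append(nb)
--     return second in visited
-- ===== Notes on version B (the rewrite author's own statement) =====
-- stated objective: simpler
-- what changed: Replaces A's two-phase pipeline (materialize a full same-value adjacency dict over the whole grid, BFS recording a parents map, then reconstruct an explicit path and test it for None) with a direct one-phase flood fill from the first cell using a visited set and a stack, finishing with a membership test of the second cell.
import Mathlib
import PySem

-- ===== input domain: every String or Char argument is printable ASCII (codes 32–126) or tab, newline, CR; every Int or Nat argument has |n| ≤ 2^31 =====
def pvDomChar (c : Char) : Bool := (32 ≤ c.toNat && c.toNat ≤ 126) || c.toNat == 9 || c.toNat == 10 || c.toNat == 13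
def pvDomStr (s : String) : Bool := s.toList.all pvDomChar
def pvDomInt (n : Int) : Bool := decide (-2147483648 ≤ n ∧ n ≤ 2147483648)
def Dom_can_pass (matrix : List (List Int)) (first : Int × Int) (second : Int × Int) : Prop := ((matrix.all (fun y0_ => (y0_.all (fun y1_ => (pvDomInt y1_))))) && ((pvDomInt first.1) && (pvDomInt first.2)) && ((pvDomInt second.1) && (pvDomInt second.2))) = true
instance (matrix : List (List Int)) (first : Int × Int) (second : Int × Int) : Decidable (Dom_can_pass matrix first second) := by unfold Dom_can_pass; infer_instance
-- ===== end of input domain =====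

-- B replaces A's adjacency-dict + parents-BFS + path reconstruction by a direct flood fill
-- with a visited set; equal return value on every input where A returns (Pre_ below).

-- ===== PORT A =====
-- total read of matrix[i][j]; the defaults are only reached where Python raises IndexError
-- (such inputs are excluded by Pre_can_pass)
def pvCell (matrix : List (List Int)) (i j : Int) : Int :=
  PySem.List.pyGetD (PySem.List.pyGetD matrix i []) j 0

-- the literal neighbour tuple  ij = ((i, j+1), (i, j-1), (i+1, j), (i-1, j))
def pvNbrRaw (c : Int × Int) : List (Int × Int) :=
  [(c.1, c.2 + 1), (c.1, c.2 - 1), (c.1 + 1, c.2), (c.1 - 1, c.2)]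

-- the guard '-1 < p < n and -1 < k < m and matrix[p][k] == value'
def pvGoodA (matrix : List (List Int)) (n m value : Int) (c : Int × Int) : Bool :=
  decide (-1 < c.1 ∧ c.1 < n ∧ -1 < c.2 ∧ c.2 < m) && (pvCell matrix c.1 c.2 == value)

-- body of the 'for neighbor in g[cur_v]' loop of bfs_p
def pvAStep (cur : Int × Int)
    (st : PySem.Dict (Int × Int) (Option (Int × Int)) × List (Int × Int)) (nb : Int × Int) :
    PySem.Dict (Int × Int) (Option (Int × Int)) × List (Int × Int) :=
  if !(st.1.contains nb) then (st.1.insert nb (some cur), st.2 ++ [nb]) else st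

-- the 'while queue' loop of bfs_p; fuel bounds the iteration count (each iteration pops one
-- queue element); the fuel chosen in pvBfs is proved sufficient, the 0-case is never reached
def pvBfsLoop (g : PySem.Dict (Int × Int) (PySem.Set (Int × Int))) :
    Nat → PySem.Dict (Int × Int) (Option (Int × Int)) → List (Int × Int) →
    PySem.Dict (Int × Int) (Option (Int × Int))
  | _, parents, [] => parents
  | 0, parents, _ :: _ => parents
  | fuel + 1, parents, cur :: queue =>
    -- 'g[cur_v]': cur is always a key of g here (comes from the parents keys ⊆ g keys),
    -- so the [] default of getD is never the KeyError case
    let st := (PySem.Dict.getD g cur []).foldl (pvAStep cur) (parents, queue)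
    pvBfsLoop g fuel st.1 st.2

-- bfs_p(start_vertex, g, parents) with parents = {} at the call site in find_path
def pvBfs (start : Int × Int) (g : PySem.Dict (Int × Int) (PySem.Set (Int × Int))) :
    PySem.Dict (Int × Int) (Option (Int × Int)) :=
  pvBfsLoop g (5 * g.size + 2) (PySem.Dict.insert PySem.Dict.empty start none) [start]

-- the 'while parent is not None' chain walk of find_path; BFS parent chains are acyclic and
-- shorter than the dict, so the fuel never runs out (can_pass only uses the option-ness anyway)
def pvPathLoop (parents : PySem.Dict (Int × Int) (Option (Int × Int))) :
    Nat → Option (Int × Int) → List (Int × Int) → List (Int × Int)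
  | _, none, path => path
  | 0, some _, path => path
  | fuel + 1, some p, path => pvPathLoop parents fuel (parents.getD p none) (path ++ [p])

def pvFindPath (start e : Int × Int) (g : PySem.Dict (Int × Int) (PySem.Set (Int × Int))) :
    Option (List (Int × Int)) :=
  if !(g.contains start) then none
  else
    let parents := pvBfs start g
    if !(parents.contains e) then none
    else some (pvPathLoop parents (parents.size + 1) (parents.getD e none) [e]).reverse  -- path[::-1]

-- the double 'for i in range(n): for j in range(m):' loop building g
def pvG (matrix : List (List Int)) (value n m : Int) :
    PySem.Dict (Int × Int) (PySem.Set (Int × Int)) :=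
  (PySem.List.pyRange 0 n 1).foldl (fun d i =>
    (PySem.List.pyRange 0 m 1).foldl (fun d j =>
      if pvCell matrix i j == value then
        d.insert (i, j)
          ((pvNbrRaw (i, j)).foldl
            (fun s p => if pvGoodA matrix n m value p then PySem.Set.add s p else s)
            PySem.Set.empty)
      else d) d) PySem.Dict.empty

def can_pass (matrix : List (List Int)) (first : Int × Int) (second : Int × Int) : Bool :=
  let value := pvCell matrix first.1 first.2
  if value ≠ pvCell matrix second.1 second.2 then false
  else
    let n : Int := (matrix.length : Int)
    let m : Int := ((PySem.List.pyGetD matrix 0 []).length : Int)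
    (pvFindPath first second (pvG matrix value n m)).isSome  -- 'is not None'

-- ===== PORT B =====
-- the guard '0 <= i < n and 0 <= j < m and matrix[i][j] == value' of B's good()
def pvGoodB (matrix : List (List Int)) (n m value : Int) (c : Int × Int) : Bool :=
  decide (0 ≤ c.1 ∧ c.1 < n ∧ 0 ≤ c.2 ∧ c.2 < m) && (pvCell matrix c.1 c.2 == value)

-- body of the 'for nb in ((i,j+1),(i,j-1),(i+1,j),(i-1,j))' loop
def pvBStep (matrix : List (List Int)) (n m value : Int)
    (st : PySem.Set (Int × Int) × List (Int × Int)) (nb : Int × Int) :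
    PySem.Set (Int × Int) × List (Int × Int) :=
  if pvGoodB matrix n m value nb && !(PySem.Set.contains st.1 nb) then
    (PySem.Set.add st.1 nb, nb :: st.2)
  else st

-- the 'while stack' loop; the stack top is kept at the list HEAD (Python's list.pop() takes
-- the last element); fuel bounds the iteration count and is proved sufficient below
def pvFlood (matrix : List (List Int)) (n m value : Int) :
    Nat → PySem.Set (Int × Int) → List (Int × Int) → PySem.Set (Int × Int)
  | _, visited, [] => visited
  | 0, visited, _ :: _ => visited
  | fuel + 1, visited, c :: stack =>
    let st := (pvNbrRaw c).foldl (pvBStep matrix n m value) (visited, stack)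
    pvFlood matrix n m value fuel st.1 st.2

def can_pass_alt (matrix : List (List Int)) (first : Int × Int) (second : Int × Int) : Bool :=
  let value := pvCell matrix first.1 first.2
  if value ≠ pvCell matrix second.1 second.2 then false
  else
    let n : Int := (matrix.length : Int)
    let m : Int := ((PySem.List.pyGetD matrix 0 []).length : Int)
    if !(pvGoodB matrix n m value first) then false
    else
      let visited := pvFlood matrix n m value
        (5 * (matrix.length * (PySem.List.pyGetD matrix 0 []).length) + 1)
        (PySem.Set.add PySem.Set.empty first) [first]
      PySem.Set.contains visited second

-- ===== PRECONDITION & SPEC =====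
-- Pre_ excludes exactly the inputs where A raises IndexError: out-of-range reads of
-- matrix[first]/matrix[second], and — when the two read values are equal, so that the grid
-- scan runs — a row shorter than len(matrix[0]).
def Pre_can_pass (matrix : List (List Int)) (first : Int × Int) (second : Int × Int) : Prop :=
  PySem.Raise.InRange matrix.length first.1 ∧
  PySem.Raise.InRange (PySem.List.pyGetD matrix first.1 []).length first.2 ∧
  PySem.Raise.InRange matrix.length second.1 ∧
  PySem.Raise.InRange (PySem.List.pyGetD matrix second.1 []).length second.2 ∧
  (PySem.List.pyGetD (PySem.List.pyGetD matrix first.1 []) first.2 0 =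
      PySem.List.pyGetD (PySem.List.pyGetD matrix second.1 []) second.2 0 →
    ∀ row ∈ matrix, (PySem.List.pyGetD matrix 0 []).length ≤ row.length)

instance (matrix : List (List Int)) (first : Int × Int) (second : Int × Int) :
    Decidable (Pre_can_pass matrix first second) := by unfold Pre_can_pass; infer_instance

def pvWitness_can_pass : List (List Int) × (Int × Int) × (Int × Int) :=
  ([[1, 1], [0, 1]], (0, 0), (1, 1))

def Spec_can_pass (matrix : List (List Int)) (first : Int × Int) (second : Int × Int) (out : Bool) : Prop := out = can_pass_alt matrix first second
instance (matrix : List (List Int)) (first : Int × Int) (second : Int × Int) (out : Bool) : Decidable (Spec_can_pass matrix first second out) := by unfold Spec_can_pass; infer_instance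

-- ===== CLAIM (what is proved, stated in full; the proofs are below) =====
def Claim_equal_can_pass : Prop := ∀ (matrix : List (List Int)) (first : Int × Int) (second : Int × Int), Dom_can_pass matrix first second → Pre_can_pass matrix first second → Spec_can_pass matrix first second (can_pass matrix first second)

-- ===== LEMMAS AND PROOFS =====

-- the list of good neighbours of a cell, and the step/reachability relations
def pvNbrs (M : List (List Int)) (n m v : Int) (c : Int × Int) : List (Int × Int) :=
  (pvNbrRaw c).filter (pvGoodB M n m v)

def pvStepB (M : List (List Int)) (n m v : Int) (a b : Int × Int) : Prop :=
  b ∈ pvNbrs M n m v a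

def pvStepG (g : PySem.Dict (Int × Int) (PySem.Set (Int × Int))) (a b : Int × Int) : Prop :=
  b ∈ PySem.Dict.getD g a []

def pvU (n m : Int) : Nat := n.toNat * m.toNat

lemma pvGood_eq (M : List (List Int)) (n m v : Int) :
    pvGoodA M n m v = pvGoodB M n m v := by
  funext c
  unfold pvGoodA pvGoodB
  rw [decide_eq_decide.mpr
    (show (-1 < c.1 ∧ c.1 < n ∧ -1 < c.2 ∧ c.2 < m) ↔
        (0 ≤ c.1 ∧ c.1 < n ∧ 0 ≤ c.2 ∧ c.2 < m) by omega)]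

lemma pvNbrRaw_nodup (c : Int × Int) : (pvNbrRaw c).Nodup := by
  simp [pvNbrRaw, Prod.ext_iff]
  omega

lemma pvNbrs_good (M : List (List Int)) (n m v : Int) (a b : Int × Int)
    (h : b ∈ pvNbrs M n m v a) : pvGoodB M n m v b = true :=
  (List.mem_filter.mp h).2

lemma pvLen_le_U (M : List (List Int)) (n m v : Int) (vis : List (Int × Int))
    (hnd : vis.Nodup) (hg : ∀ c ∈ vis, pvGoodB M n m v c = true) :
    vis.length ≤ pvU n m := by
  classical
  have h1 : vis.toFinset.card = vis.length := List.toFinset_card_of_nodup hnd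
  have h2 : vis.toFinset ⊆ (Finset.Ico (0 : Int) n) ×ˢ (Finset.Ico (0 : Int) m) := by
    intro x hx
    have hg' := hg x (List.mem_toFinset.mp hx)
    simp only [pvGoodB, Bool.and_eq_true, decide_eq_true_eq] at hg'
    simp only [Finset.mem_product, Finset.mem_Ico]
    exact ⟨⟨hg'.1.1, hg'.1.2.1⟩, ⟨hg'.1.2.2.1, hg'.1.2.2.2⟩⟩
  have h3 := Finset.card_le_card h2
  rw [h1] at h3
  refine h3.trans ?_
  rw [Finset.card_product]
  simp only [Int.card_Ico, Int.sub_zero]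
  exact le_of_eq rfl

-- ----- inner-fold facts, B side -----
lemma pvBfold_mem_v (M : List (List Int)) (n m v : Int) (ns : List (Int × Int)) :
    ∀ (vis : PySem.Set (Int × Int)) (s : List (Int × Int)) (x : Int × Int),
      x ∈ (ns.foldl (pvBStep M n m v) (vis, s)).1 ↔
        x ∈ vis ∨ (x ∈ ns ∧ pvGoodB M n m v x = true) := by
  induction ns with
  | nil => intro vis s x; simp
  | cons nb ns ih =>
    intro vis s x
    simp only [List.foldl_cons]
    by_cases hcond : (pvGoodB M n m v nb && !(PySem.Set.contains vis nb)) = true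
    · have hgnm : pvGoodB M n m v nb = true ∧ nb ∉ vis := by simpa using hcond
      have hg := hgnm.1
      rw [show pvBStep M n m v (vis, s) nb = (PySem.Set.add vis nb, nb :: s) from by
        unfold pvBStep; rw [if_pos hcond]]
      rw [ih]
      simp only [PySem.Set.mem_add, List.mem_cons]
      constructor
      · rintro ((h | rfl) | ⟨h1, h2⟩)
        · exact Or.inl h
        · exact Or.inr ⟨Or.inl rfl, hg⟩
        · exact Or.inr ⟨Or.inr h1, h2⟩
      · rintro (h | ⟨(rfl | h1), h2⟩)
        · exact Or.inl (Or.inl h)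
        · exact Or.inl (Or.inr rfl)
        · exact Or.inr ⟨h1, h2⟩
    · rw [show pvBStep M n m v (vis, s) nb = (vis, s) from by unfold pvBStep; rw [if_neg hcond]]
      rw [ih]
      simp only [List.mem_cons]
      have himp : pvGoodB M n m v nb = true → nb ∈ vis := by
        intro hg
        by_contra hnm
        exact hcond (by simpa using And.intro hg hnm)
      constructor
      · rintro (h | ⟨h1, h2⟩)
        · exact Or.inl h
        · exact Or.inr ⟨Or.inr h1, h2⟩
      · rintro (h | ⟨(rfl | h1), h2⟩)
        · exact Or.inl h
        · exact Or.inl (himp h2)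
        · exact Or.inr ⟨h1, h2⟩

lemma pvBfold_s_mono (M : List (List Int)) (n m v : Int) (ns : List (Int × Int)) :
    ∀ (vis : PySem.Set (Int × Int)) (s : List (Int × Int)) (x : Int × Int),
      x ∈ s → x ∈ (ns.foldl (pvBStep M n m v) (vis, s)).2 := by
  induction ns with
  | nil => intro vis s x h; simpa using h
  | cons nb ns ih =>
    intro vis s x h
    simp only [List.foldl_cons]
    by_cases hcond : (pvGoodB M n m v nb && !(PySem.Set.contains vis nb)) = true
    · rw [show pvBStep M n m v (vis, s) nb = (PySem.Set.add vis nb, nb :: s) from by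
        unfold pvBStep; rw [if_pos hcond]]
      exact ih _ _ _ (List.mem_cons_of_mem _ h)
    · rw [show pvBStep M n m v (vis, s) nb = (vis, s) from by unfold pvBStep; rw [if_neg hcond]]
      exact ih _ _ _ h

lemma pvBfold_s_sub (M : List (List Int)) (n m v : Int) (ns : List (Int × Int)) :
    ∀ (vis : PySem.Set (Int × Int)) (s : List (Int × Int)) (x : Int × Int),
      x ∈ (ns.foldl (pvBStep M n m v) (vis, s)).2 →
        x ∈ s ∨ x ∈ (ns.foldl (pvBStep M n m v) (vis, s)).1 := by
  induction ns with
  | nil => intro vis s x h; exact Or.inl (by simpa using h)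
  | cons nb ns ih =>
    intro vis s x h
    simp only [List.foldl_cons] at h ⊢
    by_cases hcond : (pvGoodB M n m v nb && !(PySem.Set.contains vis nb)) = true
    · rw [show pvBStep M n m v (vis, s) nb = (PySem.Set.add vis nb, nb :: s) from by
        unfold pvBStep; rw [if_pos hcond]] at h ⊢
      rcases ih _ _ _ h with h' | h'
      · rcases List.mem_cons.mp h' with rfl | h''
        · right
          exact (pvBfold_mem_v M n m v ns _ _ x).mpr
            (Or.inl ((PySem.Set.mem_add _ _ _).mpr (Or.inr rfl)))
        · exact Or.inl h''
      · exact Or.inr h'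
    · rw [show pvBStep M n m v (vis, s) nb = (vis, s) from by unfold pvBStep; rw [if_neg hcond]] at h ⊢
      exact ih _ _ _ h

lemma pvBfold_new_in_s (M : List (List Int)) (n m v : Int) (ns : List (Int × Int)) :
    ∀ (vis : PySem.Set (Int × Int)) (s : List (Int × Int)) (x : Int × Int),
      x ∈ (ns.foldl (pvBStep M n m v) (vis, s)).1 → x ∉ vis →
        x ∈ (ns.foldl (pvBStep M n m v) (vis, s)).2 := by
  induction ns with
  | nil => intro vis s x h hnv; exact absurd (by simpa using h) hnv
  | cons nb ns ih =>
    intro vis s x h hnv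
    simp only [List.foldl_cons] at h ⊢
    by_cases hcond : (pvGoodB M n m v nb && !(PySem.Set.contains vis nb)) = true
    · rw [show pvBStep M n m v (vis, s) nb = (PySem.Set.add vis nb, nb :: s) from by
        unfold pvBStep; rw [if_pos hcond]] at h ⊢
      by_cases hx : x ∈ PySem.Set.add vis nb
      · rcases (PySem.Set.mem_add _ _ _).mp hx with h' | rfl
        · exact absurd h' hnv
        · exact pvBfold_s_mono M n m v ns _ _ _ (List.mem_cons_self)
      · exact ih _ _ _ h hx
    · rw [show pvBStep M n m v (vis, s) nb = (vis, s) from by unfold pvBStep; rw [if_neg hcond]] at h ⊢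
      exact ih _ _ _ h hnv

lemma pvBfold_nodup (M : List (List Int)) (n m v : Int) (ns : List (Int × Int)) :
    ∀ (vis : PySem.Set (Int × Int)) (s : List (Int × Int)),
      vis.Nodup → (ns.foldl (pvBStep M n m v) (vis, s)).1.Nodup := by
  induction ns with
  | nil => intro vis s h; simpa using h
  | cons nb ns ih =>
    intro vis s h
    simp only [List.foldl_cons]
    by_cases hcond : (pvGoodB M n m v nb && !(PySem.Set.contains vis nb)) = true
    · rw [show pvBStep M n m v (vis, s) nb = (PySem.Set.add vis nb, nb :: s) from by
        unfold pvBStep; rw [if_pos hcond]]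
      exact ih _ _ (PySem.Set.nodup_add _ _ h)
    · rw [show pvBStep M n m v (vis, s) nb = (vis, s) from by unfold pvBStep; rw [if_neg hcond]]
      exact ih _ _ h

lemma pvBfold_len (M : List (List Int)) (n m v : Int) (ns : List (Int × Int)) :
    ∀ (vis : PySem.Set (Int × Int)) (s : List (Int × Int)),
      (ns.foldl (pvBStep M n m v) (vis, s)).1.length + s.length =
        vis.length + (ns.foldl (pvBStep M n m v) (vis, s)).2.length ∧
      (ns.foldl (pvBStep M n m v) (vis, s)).1.length ≤ vis.length + ns.length ∧
      vis.length ≤ (ns.foldl (pvBStep M n m v) (vis, s)).1.length := by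
  induction ns with
  | nil => intro vis s; simp
  | cons nb ns ih =>
    intro vis s
    simp only [List.foldl_cons, List.length_cons]
    by_cases hcond : (pvGoodB M n m v nb && !(PySem.Set.contains vis nb)) = true
    · have hgnm : pvGoodB M n m v nb = true ∧ nb ∉ vis := by simpa using hcond
      rw [show pvBStep M n m v (vis, s) nb = (PySem.Set.add vis nb, nb :: s) from by
        unfold pvBStep; rw [if_pos hcond]]
      have hadd : (PySem.Set.add vis nb).length = vis.length + 1 := by
        rw [PySem.Set.add_of_not_mem hgnm.2, List.length_append, List.length_singleton]
      obtain ⟨e1, e2, e3⟩ := ih (PySem.Set.add vis nb) (nb :: s)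
      rw [hadd] at e2 e3
      refine ⟨?_, ?_, ?_⟩
      · rw [List.length_cons] at e1; omega
      · omega
      · omega
    · rw [show pvBStep M n m v (vis, s) nb = (vis, s) from by unfold pvBStep; rw [if_neg hcond]]
      obtain ⟨e1, e2, e3⟩ := ih vis s
      exact ⟨by omega, by omega, e3⟩

-- ----- B loop spec -----
lemma pvFlood_spec (M : List (List Int)) (n m v : Int) (first : Int × Int) :
    ∀ (fuel : Nat) (vis : PySem.Set (Int × Int)) (stk : List (Int × Int)),
      vis.Nodup →
      (∀ c ∈ vis, pvGoodB M n m v c = true) →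
      (∀ c ∈ vis, Relation.ReflTransGen (pvStepB M n m v) first c) →
      (∀ c ∈ stk, c ∈ vis) →
      (∀ c ∈ vis, c ∉ stk → ∀ b ∈ pvNbrs M n m v c, b ∈ vis) →
      5 * (pvU n m - vis.length) + stk.length ≤ fuel →
      (∀ x ∈ vis, x ∈ pvFlood M n m v fuel vis stk) ∧
      (∀ x ∈ pvFlood M n m v fuel vis stk, Relation.ReflTransGen (pvStepB M n m v) first x) ∧
      (∀ x ∈ pvFlood M n m v fuel vis stk, ∀ b ∈ pvNbrs M n m v x, b ∈ pvFlood M n m v fuel vis stk) := by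
  intro fuel
  induction fuel with
  | zero =>
    intro vis stk h1 h2 h3 h4 h5 h6
    have hstk : stk = [] := List.eq_nil_of_length_eq_zero (by omega)
    subst hstk
    refine ⟨fun x hx => hx, h3, fun x hx b hb => h5 x hx (by simp) b hb⟩
  | succ fuel ih =>
    intro vis stk h1 h2 h3 h4 h5 h6
    cases stk with
    | nil =>
      refine ⟨fun x hx => hx, h3, fun x hx b hb => h5 x hx (by simp) b hb⟩
    | cons c rest =>
      have hflood : pvFlood M n m v (fuel + 1) vis (c :: rest) =
          pvFlood M n m v fuel ((pvNbrRaw c).foldl (pvBStep M n m v) (vis, rest)).1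
            ((pvNbrRaw c).foldl (pvBStep M n m v) (vis, rest)).2 := rfl
      have hmemv := pvBfold_mem_v M n m v (pvNbrRaw c) vis rest
      have hnd' := pvBfold_nodup M n m v (pvNbrRaw c) vis rest h1
      have hgood' : ∀ x ∈ ((pvNbrRaw c).foldl (pvBStep M n m v) (vis, rest)).1,
          pvGoodB M n m v x = true := by
        intro x hx
        rcases (hmemv x).mp hx with h' | ⟨_, h'⟩
        · exact h2 x h'
        · exact h'
      have hreach' : ∀ x ∈ ((pvNbrRaw c).foldl (pvBStep M n m v) (vis, rest)).1,
          Relation.ReflTransGen (pvStepB M n m v) first x := by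
        intro x hx
        rcases (hmemv x).mp hx with h' | ⟨hraw, hgx⟩
        · exact h3 x h'
        · exact (h3 c (h4 c List.mem_cons_self)).tail (List.mem_filter.mpr ⟨hraw, hgx⟩)
      have hsub' : ∀ x ∈ ((pvNbrRaw c).foldl (pvBStep M n m v) (vis, rest)).2,
          x ∈ ((pvNbrRaw c).foldl (pvBStep M n m v) (vis, rest)).1 := by
        intro x hx
        rcases pvBfold_s_sub M n m v (pvNbrRaw c) vis rest x hx with h' | h'
        · exact (hmemv x).mpr (Or.inl (h4 x (List.mem_cons_of_mem _ h')))
        · exact h'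
      have hcl' : ∀ x ∈ ((pvNbrRaw c).foldl (pvBStep M n m v) (vis, rest)).1,
          x ∉ ((pvNbrRaw c).foldl (pvBStep M n m v) (vis, rest)).2 →
          ∀ b ∈ pvNbrs M n m v x, b ∈ ((pvNbrRaw c).foldl (pvBStep M n m v) (vis, rest)).1 := by
        intro x hx hxs b hb
        by_cases hxv : x ∈ vis
        · by_cases hxc : x = c
          · subst hxc
            have hbf := List.mem_filter.mp hb
            exact (hmemv b).mpr (Or.inr ⟨hbf.1, hbf.2⟩)
          · have hxr : x ∉ rest := fun h' =>
              hxs (pvBfold_s_mono M n m v (pvNbrRaw c) vis rest x h')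
            have hnotin : x ∉ c :: rest := by simp [hxc, hxr]
            exact (hmemv b).mpr (Or.inl (h5 x hxv hnotin b hb))
        · exact absurd (pvBfold_new_in_s M n m v (pvNbrRaw c) vis rest x hx hxv) hxs
      have hfuel' : 5 * (pvU n m - ((pvNbrRaw c).foldl (pvBStep M n m v) (vis, rest)).1.length)
          + ((pvNbrRaw c).foldl (pvBStep M n m v) (vis, rest)).2.length ≤ fuel := by
        obtain ⟨e1, e2, e3⟩ := pvBfold_len M n m v (pvNbrRaw c) vis rest
        have hU := pvLen_le_U M n m v _ hnd' hgood'
        have h4len : (pvNbrRaw c).length = 4 := rfl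
        simp only [List.length_cons] at h6
        omega
      obtain ⟨ih1, ih2, ih3⟩ := ih _ _ hnd' hgood' hreach' hsub' hcl' hfuel'
      rw [hflood]
      exact ⟨fun x hx => ih1 x ((hmemv x).mpr (Or.inl hx)), ih2, ih3⟩

lemma pvReach_mem (M : List (List Int)) (n m v : Int) (first : Int × Int)
    (R : List (Int × Int)) (hfirst : first ∈ R)
    (hcl : ∀ x ∈ R, ∀ b ∈ pvNbrs M n m v x, b ∈ R) (x : Int × Int)
    (hx : Relation.ReflTransGen (pvStepB M n m v) first x) : x ∈ R := by
  induction hx with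
  | refl => exact hfirst
  | tail _ hbc ih => exact hcl _ ih _ hbc

-- ----- inner-fold facts, A side -----
lemma pvAfold_mem_v (cur : Int × Int) (ns : List (Int × Int)) :
    ∀ (pa : PySem.Dict (Int × Int) (Option (Int × Int))) (q : List (Int × Int)) (x : Int × Int),
      x ∈ (ns.foldl (pvAStep cur) (pa, q)).1.keys ↔ x ∈ pa.keys ∨ x ∈ ns := by
  induction ns with
  | nil => intro pa q x; simp
  | cons nb ns ih =>
    intro pa q x
    simp only [List.foldl_cons]
    by_cases hcond : (!(pa.contains nb)) = true
    · rw [show pvAStep cur (pa, q) nb = (pa.insert nb (some cur), q ++ [nb]) from by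
        unfold pvAStep; rw [if_pos hcond]]
      rw [ih]
      simp only [PySem.Dict.mem_keys_insert, List.mem_cons]
      tauto
    · rw [show pvAStep cur (pa, q) nb = (pa, q) from by unfold pvAStep; rw [if_neg hcond]]
      rw [ih]
      simp only [List.mem_cons]
      have hct : pa.contains nb = true := by simpa using hcond
      have hmem : nb ∈ pa.keys := (PySem.Dict.contains_iff_mem_keys _ _).mp hct
      constructor
      · tauto
      · rintro (h | (rfl | h))
        · exact Or.inl h
        · exact Or.inl hmem
        · exact Or.inr h

lemma pvAfold_s_mono (cur : Int × Int) (ns : List (Int × Int)) :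
    ∀ (pa : PySem.Dict (Int × Int) (Option (Int × Int))) (q : List (Int × Int)) (x : Int × Int),
      x ∈ q → x ∈ (ns.foldl (pvAStep cur) (pa, q)).2 := by
  induction ns with
  | nil => intro pa q x h; simpa using h
  | cons nb ns ih =>
    intro pa q x h
    simp only [List.foldl_cons]
    by_cases hcond : (!(pa.contains nb)) = true
    · rw [show pvAStep cur (pa, q) nb = (pa.insert nb (some cur), q ++ [nb]) from by
        unfold pvAStep; rw [if_pos hcond]]
      exact ih _ _ _ (List.mem_append_left _ h)
    · rw [show pvAStep cur (pa, q) nb = (pa, q) from by unfold pvAStep; rw [if_neg hcond]]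
      exact ih _ _ _ h

lemma pvAfold_s_sub (cur : Int × Int) (ns : List (Int × Int)) :
    ∀ (pa : PySem.Dict (Int × Int) (Option (Int × Int))) (q : List (Int × Int)) (x : Int × Int),
      x ∈ (ns.foldl (pvAStep cur) (pa, q)).2 →
        x ∈ q ∨ x ∈ (ns.foldl (pvAStep cur) (pa, q)).1.keys := by
  induction ns with
  | nil => intro pa q x h; exact Or.inl (by simpa using h)
  | cons nb ns ih =>
    intro pa q x h
    simp only [List.foldl_cons] at h ⊢
    by_cases hcond : (!(pa.contains nb)) = true
    · rw [show pvAStep cur (pa, q) nb = (pa.insert nb (some cur), q ++ [nb]) from by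
        unfold pvAStep; rw [if_pos hcond]] at h ⊢
      rcases ih _ _ _ h with h' | h'
      · rcases List.mem_append.mp h' with h'' | h''
        · exact Or.inl h''
        · right
          refine (pvAfold_mem_v cur ns _ _ x).mpr (Or.inl ?_)
          rw [List.mem_singleton] at h''
          subst h''
          exact (PySem.Dict.mem_keys_insert _ _ _ _).mpr (Or.inl rfl)
      · exact Or.inr h'
    · rw [show pvAStep cur (pa, q) nb = (pa, q) from by unfold pvAStep; rw [if_neg hcond]] at h ⊢
      exact ih _ _ _ h

lemma pvAfold_new_in_s (cur : Int × Int) (ns : List (Int × Int)) :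
    ∀ (pa : PySem.Dict (Int × Int) (Option (Int × Int))) (q : List (Int × Int)) (x : Int × Int),
      x ∈ (ns.foldl (pvAStep cur) (pa, q)).1.keys → x ∉ pa.keys →
        x ∈ (ns.foldl (pvAStep cur) (pa, q)).2 := by
  induction ns with
  | nil => intro pa q x h hnv; exact absurd (by simpa using h) hnv
  | cons nb ns ih =>
    intro pa q x h hnv
    simp only [List.foldl_cons] at h ⊢
    by_cases hcond : (!(pa.contains nb)) = true
    · rw [show pvAStep cur (pa, q) nb = (pa.insert nb (some cur), q ++ [nb]) from by
        unfold pvAStep; rw [if_pos hcond]] at h ⊢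
      by_cases hx : x ∈ (pa.insert nb (some cur)).keys
      · rcases (PySem.Dict.mem_keys_insert _ _ _ _).mp hx with rfl | h'
        · exact pvAfold_s_mono cur ns _ _ _ (List.mem_append_right _ (List.mem_singleton.mpr rfl))
        · exact absurd h' hnv
      · exact ih _ _ _ h hx
    · rw [show pvAStep cur (pa, q) nb = (pa, q) from by unfold pvAStep; rw [if_neg hcond]] at h ⊢
      exact ih _ _ _ h hnv

lemma pvAfold_nodup (cur : Int × Int) (ns : List (Int × Int)) :
    ∀ (pa : PySem.Dict (Int × Int) (Option (Int × Int))) (q : List (Int × Int)),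
      pa.keys.Nodup → (ns.foldl (pvAStep cur) (pa, q)).1.keys.Nodup := by
  induction ns with
  | nil => intro pa q h; simpa using h
  | cons nb ns ih =>
    intro pa q h
    simp only [List.foldl_cons]
    by_cases hcond : (!(pa.contains nb)) = true
    · rw [show pvAStep cur (pa, q) nb = (pa.insert nb (some cur), q ++ [nb]) from by
        unfold pvAStep; rw [if_pos hcond]]
      exact ih _ _ (PySem.Dict.nodup_keys_insert _ _ _ h)
    · rw [show pvAStep cur (pa, q) nb = (pa, q) from by unfold pvAStep; rw [if_neg hcond]]
      exact ih _ _ h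

lemma pvAfold_len (cur : Int × Int) (ns : List (Int × Int)) :
    ∀ (pa : PySem.Dict (Int × Int) (Option (Int × Int))) (q : List (Int × Int)),
      (ns.foldl (pvAStep cur) (pa, q)).1.keys.length + q.length =
        pa.keys.length + (ns.foldl (pvAStep cur) (pa, q)).2.length ∧
      (ns.foldl (pvAStep cur) (pa, q)).1.keys.length ≤ pa.keys.length + ns.length ∧
      pa.keys.length ≤ (ns.foldl (pvAStep cur) (pa, q)).1.keys.length := by
  induction ns with
  | nil => intro pa q; simp
  | cons nb ns ih =>
    intro pa q
    simp only [List.foldl_cons, List.length_cons]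
    by_cases hcond : (!(pa.contains nb)) = true
    · have hcf : pa.contains nb = false := by simpa using hcond
      rw [show pvAStep cur (pa, q) nb = (pa.insert nb (some cur), q ++ [nb]) from by
        unfold pvAStep; rw [if_pos hcond]]
      have hins : (pa.insert nb (some cur)).keys.length = pa.keys.length + 1 := by
        rw [PySem.Dict.keys_insert_of_not_contains _ _ hcf, List.length_append,
          List.length_singleton]
      obtain ⟨e1, e2, e3⟩ := ih (pa.insert nb (some cur)) (q ++ [nb])
      rw [hins] at e2 e3
      rw [List.length_append, List.length_singleton] at e1
      exact ⟨by omega, by omega, by omega⟩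
    · rw [show pvAStep cur (pa, q) nb = (pa, q) from by unfold pvAStep; rw [if_neg hcond]]
      obtain ⟨e1, e2, e3⟩ := ih pa q
      exact ⟨by omega, by omega, e3⟩

-- ----- A loop spec (abstract in g) -----
lemma pvBfsLoop_spec (g : PySem.Dict (Int × Int) (PySem.Set (Int × Int)))
    (hcl : ∀ a b, b ∈ PySem.Dict.getD g a [] → b ∈ g.keys) (first : Int × Int) :
    ∀ (fuel : Nat) (pa : PySem.Dict (Int × Int) (Option (Int × Int))) (q : List (Int × Int)),
      pa.keys.Nodup →
      (∀ c ∈ pa.keys, c ∈ g.keys) →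
      (∀ c ∈ pa.keys, Relation.ReflTransGen (pvStepG g) first c) →
      (∀ c ∈ q, c ∈ pa.keys) →
      (∀ c ∈ pa.keys, c ∉ q → ∀ b ∈ PySem.Dict.getD g c [], b ∈ pa.keys) →
      5 * (g.keys.length - pa.keys.length) + q.length ≤ fuel →
      (∀ x ∈ pa.keys, x ∈ (pvBfsLoop g fuel pa q).keys) ∧
      (∀ x ∈ (pvBfsLoop g fuel pa q).keys, Relation.ReflTransGen (pvStepG g) first x) ∧
      (∀ x ∈ (pvBfsLoop g fuel pa q).keys, ∀ b ∈ PySem.Dict.getD g x [],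
        b ∈ (pvBfsLoop g fuel pa q).keys) := by
  intro fuel
  induction fuel with
  | zero =>
    intro pa q h1 h2 h3 h4 h5 h6
    have hq : q = [] := List.eq_nil_of_length_eq_zero (by omega)
    subst hq
    refine ⟨fun x hx => hx, h3, fun x hx b hb => h5 x hx (by simp) b hb⟩
  | succ fuel ih =>
    intro pa q h1 h2 h3 h4 h5 h6
    cases q with
    | nil =>
      refine ⟨fun x hx => hx, h3, fun x hx b hb => h5 x hx (by simp) b hb⟩
    | cons c rest =>
      have hloop : pvBfsLoop g (fuel + 1) pa (c :: rest) =
          pvBfsLoop g fuel ((PySem.Dict.getD g c []).foldl (pvAStep c) (pa, rest)).1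
            ((PySem.Dict.getD g c []).foldl (pvAStep c) (pa, rest)).2 := rfl
      have hmemv := pvAfold_mem_v c (PySem.Dict.getD g c []) pa rest
      have hnd' := pvAfold_nodup c (PySem.Dict.getD g c []) pa rest h1
      have hsubg' : ∀ x ∈ ((PySem.Dict.getD g c []).foldl (pvAStep c) (pa, rest)).1.keys,
          x ∈ g.keys := by
        intro x hx
        rcases (hmemv x).mp hx with h' | h'
        · exact h2 x h'
        · exact hcl c x h'
      have hreach' : ∀ x ∈ ((PySem.Dict.getD g c []).foldl (pvAStep c) (pa, rest)).1.keys,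
          Relation.ReflTransGen (pvStepG g) first x := by
        intro x hx
        rcases (hmemv x).mp hx with h' | h'
        · exact h3 x h'
        · exact (h3 c (h4 c List.mem_cons_self)).tail h'
      have hsub' : ∀ x ∈ ((PySem.Dict.getD g c []).foldl (pvAStep c) (pa, rest)).2,
          x ∈ ((PySem.Dict.getD g c []).foldl (pvAStep c) (pa, rest)).1.keys := by
        intro x hx
        rcases pvAfold_s_sub c (PySem.Dict.getD g c []) pa rest x hx with h' | h'
        · exact (hmemv x).mpr (Or.inl (h4 x (List.mem_cons_of_mem _ h')))
        · exact h'
      have hcl' : ∀ x ∈ ((PySem.Dict.getD g c []).foldl (pvAStep c) (pa, rest)).1.keys,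
          x ∉ ((PySem.Dict.getD g c []).foldl (pvAStep c) (pa, rest)).2 →
          ∀ b ∈ PySem.Dict.getD g x [],
            b ∈ ((PySem.Dict.getD g c []).foldl (pvAStep c) (pa, rest)).1.keys := by
        intro x hx hxs b hb
        by_cases hxv : x ∈ pa.keys
        · by_cases hxc : x = c
          · subst hxc
            exact (hmemv b).mpr (Or.inr hb)
          · have hxr : x ∉ rest := fun h' =>
              hxs (pvAfold_s_mono c (PySem.Dict.getD g c []) pa rest x h')
            have hnotin : x ∉ c :: rest := by simp [hxc, hxr]
            exact (hmemv b).mpr (Or.inl (h5 x hxv hnotin b hb))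
        · exact absurd (pvAfold_new_in_s c (PySem.Dict.getD g c []) pa rest x hx hxv) hxs
      have hfuel' : 5 * (g.keys.length -
            ((PySem.Dict.getD g c []).foldl (pvAStep c) (pa, rest)).1.keys.length)
          + ((PySem.Dict.getD g c []).foldl (pvAStep c) (pa, rest)).2.length ≤ fuel := by
        obtain ⟨e1, e2, e3⟩ := pvAfold_len c (PySem.Dict.getD g c []) pa rest
        have hU := List.Subperm.length_le (List.Nodup.subperm hnd' hsubg')
        simp only [List.length_cons] at h6
        omega
      obtain ⟨ih1, ih2, ih3⟩ := ih _ _ hnd' hsubg' hreach' hsub' hcl' hfuel'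
      rw [hloop]
      exact ⟨fun x hx => ih1 x ((hmemv x).mpr (Or.inl hx)), ih2, ih3⟩

lemma pvReachG_mem (g : PySem.Dict (Int × Int) (PySem.Set (Int × Int))) (first : Int × Int)
    (R : List (Int × Int)) (hfirst : first ∈ R)
    (hcl : ∀ x ∈ R, ∀ b ∈ PySem.Dict.getD g x [], b ∈ R) (x : Int × Int)
    (hx : Relation.ReflTransGen (pvStepG g) first x) : x ∈ R := by
  induction hx with
  | refl => exact hfirst
  | tail _ hbc ih => exact hcl _ ih _ hbc

-- ----- characterization of the built dict g -----
lemma pvSetFold_filter (M : List (List Int)) (n m v : Int) (ns : List (Int × Int)) :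
    ∀ (s0 : PySem.Set (Int × Int)), ns.Nodup → (∀ x ∈ ns, x ∉ s0) →
      ns.foldl (fun s p => if pvGoodB M n m v p then PySem.Set.add s p else s) s0 =
        s0 ++ ns.filter (pvGoodB M n m v) := by
  induction ns with
  | nil => intro s0 _ _; simp
  | cons nb ns ih =>
    intro s0 hnd hfresh
    simp only [List.foldl_cons, List.filter_cons]
    by_cases hg : pvGoodB M n m v nb = true
    · rw [if_pos hg, hg, PySem.Set.add_of_not_mem (hfresh nb List.mem_cons_self)]
      rw [ih (s0 ++ [nb]) (List.nodup_cons.mp hnd).2 ?_]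
      · simp
      · intro x hx
        simp only [List.mem_append, List.mem_singleton]
        rintro (h' | rfl)
        · exact hfresh x (List.mem_cons_of_mem _ hx) h'
        · exact (List.nodup_cons.mp hnd).1 hx
    · rw [if_neg hg, Bool.eq_false_iff.mpr hg]
      exact ih s0 (List.nodup_cons.mp hnd).2
        (fun x hx => hfresh x (List.mem_cons_of_mem _ hx))

-- the grid scan as a single fold over the list of all (i, j) cells
def pvCells (n m : Int) : List (Int × Int) :=
  (PySem.List.pyRange 0 n 1).flatMap
    (fun i => (PySem.List.pyRange 0 m 1).map (fun j => ((i, j) : Int × Int)))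

def pvGF (M : List (List Int)) (n m v : Int)
    (d : PySem.Dict (Int × Int) (PySem.Set (Int × Int))) (c : Int × Int) :
    PySem.Dict (Int × Int) (PySem.Set (Int × Int)) :=
  if pvCell M c.1 c.2 == v then
    d.insert c
      ((pvNbrRaw c).foldl
        (fun s p => if pvGoodA M n m v p then PySem.Set.add s p else s)
        PySem.Set.empty)
  else d

lemma pvG_eq_foldl (M : List (List Int)) (n m v : Int) :
    pvG M v n m = (pvCells n m).foldl (pvGF M n m v) PySem.Dict.empty := by
  unfold pvG pvCells
  rw [List.foldl_flatMap]
  simp only [List.foldl_map]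
  rfl

lemma pvGF_inner (M : List (List Int)) (n m v : Int) (c : Int × Int) :
    (pvNbrRaw c).foldl
        (fun s p => if pvGoodA M n m v p then PySem.Set.add s p else s)
        PySem.Set.empty = pvNbrs M n m v c := by
  have h : (fun s p => if pvGoodA M n m v p then PySem.Set.add s p else s) =
      (fun s p => if pvGoodB M n m v p then PySem.Set.add s p else s) := by
    funext s p
    rw [pvGood_eq]
  rw [h, pvSetFold_filter M n m v (pvNbrRaw c) PySem.Set.empty (pvNbrRaw_nodup c)
    (by intro x _ hx; simp [PySem.Set.empty] at hx)]
  simp [pvNbrs, PySem.Set.empty]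

lemma pvGfold_get? (M : List (List Int)) (n m v : Int) (cs : List (Int × Int)) :
    ∀ (d : PySem.Dict (Int × Int) (PySem.Set (Int × Int))) (q : Int × Int),
      ((cs.foldl (pvGF M n m v) d).get? q) =
        if q ∈ cs ∧ pvCell M q.1 q.2 = v then some (pvNbrs M n m v q) else d.get? q := by
  induction cs with
  | nil => intro d q; simp
  | cons c cs ih =>
    intro d q
    simp only [List.foldl_cons]
    rw [ih]
    by_cases hq : q ∈ cs ∧ pvCell M q.1 q.2 = v
    · rw [if_pos hq, if_pos ⟨List.mem_cons_of_mem _ hq.1, hq.2⟩]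
    · rw [if_neg hq]
      unfold pvGF
      by_cases hc : pvCell M c.1 c.2 = v
      · rw [if_pos (beq_iff_eq.mpr hc), PySem.Dict.get?_insert, pvGF_inner]
        by_cases hqc : q = c
        · subst hqc
          rw [if_pos rfl, if_pos ⟨List.mem_cons_self, hc⟩]
        · rw [if_neg hqc, if_neg ?_]
          rintro ⟨hmem, hval⟩
          rcases List.mem_cons.mp hmem with rfl | h'
          · exact hqc rfl
          · exact hq ⟨h', hval⟩
      · rw [if_neg (by simpa using hc), if_neg ?_]
        rintro ⟨hmem, hval⟩
        rcases List.mem_cons.mp hmem with rfl | h'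
        · exact hc hval
        · exact hq ⟨h', hval⟩

lemma pvMem_cells (n m : Int) (q : Int × Int) :
    q ∈ pvCells n m ↔ (0 ≤ q.1 ∧ q.1 < n ∧ 0 ≤ q.2 ∧ q.2 < m) := by
  simp only [pvCells, List.mem_flatMap, List.mem_map, PySem.List.mem_pyRange_one]
  constructor
  · rintro ⟨i, hi, j, hj, rfl⟩
    exact ⟨hi.1, hi.2, hj.1, hj.2⟩
  · rintro ⟨h1, h2, h3, h4⟩
    exact ⟨q.1, ⟨h1, h2⟩, q.2, ⟨h3, h4⟩, rfl⟩

lemma pvG_get? (M : List (List Int)) (n m v : Int) (q : Int × Int) :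
    (pvG M v n m).get? q =
      if pvGoodB M n m v q then some (pvNbrs M n m v q) else none := by
  rw [pvG_eq_foldl, pvGfold_get?]
  by_cases hg : pvGoodB M n m v q = true
  · rw [if_pos hg, if_pos ?_]
    simp only [pvGoodB, Bool.and_eq_true, decide_eq_true_eq, beq_iff_eq] at hg
    exact ⟨(pvMem_cells n m q).mpr hg.1, hg.2⟩
  · rw [if_neg hg, if_neg ?_, PySem.Dict.get?_empty]
    rintro ⟨hmem, hval⟩
    refine hg ?_
    have hb := (pvMem_cells n m q).mp hmem
    simp only [pvGoodB, Bool.and_eq_true, decide_eq_true_eq, beq_iff_eq]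
    exact ⟨hb, hval⟩

lemma pvG_contains (M : List (List Int)) (n m v : Int) (q : Int × Int) :
    (pvG M v n m).contains q = pvGoodB M n m v q := by
  rw [PySem.Dict.contains_eq_isSome_get?, pvG_get?]
  by_cases hg : pvGoodB M n m v q = true
  · simp [hg]
  · simp [Bool.eq_false_iff.mpr hg]

lemma pvG_getD (M : List (List Int)) (n m v : Int) (q : Int × Int) :
    PySem.Dict.getD (pvG M v n m) q [] =
      if pvGoodB M n m v q then pvNbrs M n m v q else [] := by
  rw [PySem.Dict.getD_eq_get?_getD, pvG_get?]
  by_cases hg : pvGoodB M n m v q = true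
  · simp [hg]
  · simp [Bool.eq_false_iff.mpr hg]

lemma pvG_closed (M : List (List Int)) (n m v : Int) :
    ∀ a b, b ∈ PySem.Dict.getD (pvG M v n m) a [] → b ∈ (pvG M v n m).keys := by
  intro a b hb
  rw [pvG_getD] at hb
  rw [← PySem.Dict.contains_iff_mem_keys, pvG_contains]
  split at hb
  · exact pvNbrs_good M n m v a b hb
  · simp at hb

-- ----- bridge between the two step relations -----
lemma pvReach_good (M : List (List Int)) (n m v : Int) (first x : Int × Int)
    (hf : pvGoodB M n m v first = true)
    (hx : Relation.ReflTransGen (pvStepB M n m v) first x) : pvGoodB M n m v x = true := by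
  induction hx with
  | refl => exact hf
  | tail _ hbc _ => exact pvNbrs_good M n m v _ _ hbc

lemma pvReach_iff (M : List (List Int)) (n m v : Int) (first x : Int × Int)
    (hf : pvGoodB M n m v first = true) :
    Relation.ReflTransGen (pvStepB M n m v) first x ↔
      Relation.ReflTransGen (pvStepG (pvG M v n m)) first x := by
  constructor
  · intro h
    induction h with
    | refl => exact Relation.ReflTransGen.refl
    | @tail b c hab hbc ih =>
      refine ih.tail ?_
      have hb : pvGoodB M n m v b = true := pvReach_good M n m v first b hf hab
      unfold pvStepG
      rw [pvG_getD, if_pos hb]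
      exact hbc
  · intro h
    induction h with
    | refl => exact Relation.ReflTransGen.refl
    | @tail b c hab hbc ih =>
      refine ih.tail ?_
      unfold pvStepG at hbc
      rw [pvG_getD] at hbc
      unfold pvStepB
      split at hbc
      · exact hbc
      · simp at hbc

-- ===== VERDICT (by name: the statement is the Claim_ definition above) =====
theorem can_pass_spec : Claim_equal_can_pass := by
  unfold Claim_equal_can_pass
  intro M first second _ _
  simp only [Spec_can_pass, can_pass, can_pass_alt]
  by_cases hval : pvCell M first.1 first.2 ≠ pvCell M second.1 second.2
  · rw [if_pos hval, if_pos hval]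
  · rw [if_neg hval, if_neg hval]
    generalize hv : pvCell M first.1 first.2 = v
    by_cases hgood : pvGoodB M (M.length : Int) ((PySem.List.pyGetD M 0 []).length : Int) v
        first = true
    · -- first is a good cell: both sides decide reachability of second
      have hA : ∀ g : PySem.Dict (Int × Int) (PySem.Set (Int × Int)), g.contains first = true →
          (pvFindPath first second g).isSome = (pvBfs first g).contains second := by
        intro g hg
        unfold pvFindPath
        rw [hg]
        simp only [Bool.not_true]
        cases h2 : (pvBfs first g).contains second <;> simp
      rw [hA (pvG M v (M.length : Int) ((PySem.List.pyGetD M 0 []).length : Int)) (by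
        rw [pvG_contains]; exact hgood)]
      rw [hgood]
      simp only [Bool.not_true, Bool.false_eq_true, if_false]
      -- the flood-fill side
      have hvis0 : PySem.Set.add PySem.Set.empty first = [first] := by
        rw [PySem.Set.add_of_not_mem (by simp [PySem.Set.empty])]
        simp [PySem.Set.empty]
      rw [hvis0]
      have hUeq : pvU (M.length : Int) ((PySem.List.pyGetD M 0 []).length : Int) =
          M.length * (PySem.List.pyGetD M 0 []).length := by
        simp [pvU]
      obtain ⟨hB1, hB2, hB3⟩ := pvFlood_spec M (M.length : Int)
          ((PySem.List.pyGetD M 0 []).length : Int) v first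
          (5 * (M.length * (PySem.List.pyGetD M 0 []).length) + 1) [first] [first]
          (by simp)
          (by intro c hc; rw [List.mem_singleton] at hc; subst hc; exact hgood)
          (by intro c hc; rw [List.mem_singleton] at hc; subst hc; exact Relation.ReflTransGen.refl)
          (by intro c hc; exact hc)
          (by intro c hc hcn; exact absurd hc hcn)
          (by rw [hUeq]; simp only [List.length_singleton]; omega)
      have hBmem : ∀ x, x ∈ pvFlood M (M.length : Int)
          ((PySem.List.pyGetD M 0 []).length : Int) v
          (5 * (M.length * (PySem.List.pyGetD M 0 []).length) + 1) [first] [first] ↔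
          Relation.ReflTransGen (pvStepB M (M.length : Int)
            ((PySem.List.pyGetD M 0 []).length : Int) v) first x := by
        intro x
        refine ⟨hB2 x, fun h => pvReach_mem M _ _ v first _ (hB1 first (by simp)) hB3 x h⟩
      -- the BFS side
      have hfirstg : first ∈ (pvG M v (M.length : Int)
          ((PySem.List.pyGetD M 0 []).length : Int)).keys := by
        rw [← PySem.Dict.contains_iff_mem_keys, pvG_contains]
        exact hgood
      have hk0 : (PySem.Dict.insert (PySem.Dict.empty
          (κ := Int × Int) (ν := Option (Int × Int))) first none).keys = [first] := by
        rw [PySem.Dict.keys_insert_of_not_contains _ _ (by simp [PySem.Dict.contains_empty])]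
        simp [PySem.Dict.keys_empty]
      have hsz : (pvG M v (M.length : Int)
            ((PySem.List.pyGetD M 0 []).length : Int)).keys.length =
          (pvG M v (M.length : Int) ((PySem.List.pyGetD M 0 []).length : Int)).size := by
        simp [PySem.Dict.keys, PySem.Dict.size]
      obtain ⟨hA1, hA2, hA3⟩ := pvBfsLoop_spec
          (pvG M v (M.length : Int) ((PySem.List.pyGetD M 0 []).length : Int))
          (pvG_closed M (M.length : Int) ((PySem.List.pyGetD M 0 []).length : Int) v) first
          (5 * (pvG M v (M.length : Int) ((PySem.List.pyGetD M 0 []).length : Int)).size + 2)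
          (PySem.Dict.insert PySem.Dict.empty first none) [first]
          (by rw [hk0]; simp)
          (by intro c hc; rw [hk0, List.mem_singleton] at hc; subst hc; exact hfirstg)
          (by intro c hc; rw [hk0, List.mem_singleton] at hc; subst hc;
              exact Relation.ReflTransGen.refl)
          (by intro c hc; rw [hk0]; exact hc)
          (by intro c hc hcn; rw [hk0] at hc; exact absurd hc hcn)
          (by rw [hk0]; simp only [List.length_singleton]; omega)
      have hbfs : pvBfs first (pvG M v (M.length : Int)
            ((PySem.List.pyGetD M 0 []).length : Int)) =
          pvBfsLoop (pvG M v (M.length : Int) ((PySem.List.pyGetD M 0 []).length : Int))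
            (5 * (pvG M v (M.length : Int) ((PySem.List.pyGetD M 0 []).length : Int)).size + 2)
            (PySem.Dict.insert PySem.Dict.empty first none) [first] := rfl
      have hAmem : ∀ x, x ∈ (pvBfs first (pvG M v (M.length : Int)
            ((PySem.List.pyGetD M 0 []).length : Int))).keys ↔
          Relation.ReflTransGen (pvStepG (pvG M v (M.length : Int)
            ((PySem.List.pyGetD M 0 []).length : Int))) first x := by
        intro x
        rw [hbfs]
        refine ⟨hA2 x, fun h => pvReachG_mem _ first _
          (hA1 first (by rw [hk0]; simp)) hA3 x h⟩
      apply Bool.coe_iff_coe.mp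
      rw [PySem.Dict.contains_iff_mem_keys, PySem.Set.contains_iff]
      rw [hAmem, hBmem]
      exact (pvReach_iff M (M.length : Int) ((PySem.List.pyGetD M 0 []).length : Int) v
        first second hgood).symm
    · -- first is not a good cell: first ∉ g, and B's guard fails
      have hgf : pvGoodB M (M.length : Int) ((PySem.List.pyGetD M 0 []).length : Int) v
          first = false := Bool.eq_false_iff.mpr hgood
      rw [hgf]
      simp only [Bool.not_false, if_true]
      unfold pvFindPath
      rw [pvG_contains, hgf]
      simp
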